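-- pv_equiv track=rewrite | github.com/sfgeekgit/repdigits | reps.py | get_repdigits
-- ===== SOURCE A (Python) =====
-- def get_repdigits(max_len = 6, use_zero=False):
--     repdigits = []
--     if use_zero:
--         repdigits = [0]
--     for lenn in range(1, max_len+1):
--         ones = 0;
--         for place in range(0, lenn):
--             # make the ones, like 111111
--             ones = ones + 10**place
--         for i in range(1,10):
--             # fill in the list with ones * i
--             repdigits.append(ones * i)
--     return repdigits
-- ===== SOURCE B (Python) =====
-- def get_repdigits(max_len = 6, use_zero=False):
--     head = [0] if use_zero else []
--     return head + [d * (10 ** lenn - 1) // 9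
--                    for lenn in range(1, max_len + 1)
--                    for d in range(1, 10)]
-- ===== Notes on version B (the rewrite author's own statement) =====
-- stated objective: simpler
-- what changed: A's inner loop summing powers of ten to build the repunit is removed: B computes each repdigit directly by the closed form d * (10**lenn - 1) // 9 in a single comprehension.
import Mathlib
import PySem

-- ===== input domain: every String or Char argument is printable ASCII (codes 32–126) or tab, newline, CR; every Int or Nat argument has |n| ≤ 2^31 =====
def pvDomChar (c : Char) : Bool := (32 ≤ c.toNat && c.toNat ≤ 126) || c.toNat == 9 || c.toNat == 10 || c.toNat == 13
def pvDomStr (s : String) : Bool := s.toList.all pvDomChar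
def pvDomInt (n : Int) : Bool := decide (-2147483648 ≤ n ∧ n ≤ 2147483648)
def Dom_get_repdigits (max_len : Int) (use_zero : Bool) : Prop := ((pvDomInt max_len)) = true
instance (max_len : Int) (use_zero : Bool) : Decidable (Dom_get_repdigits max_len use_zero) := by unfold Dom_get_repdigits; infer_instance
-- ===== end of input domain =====

-- B replaces A's inner power-sum loop by the closed-form repunit (10^len - 1) // 9, objective: simpler.

-- ===== PORT A =====
-- '10**place': place ranges over range(0, lenn) so is nonnegative; 'place.toNat' is exact here.
def get_repdigits (max_len : Int) (use_zero : Bool) : List Int :=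
  let repdigits : List Int := if use_zero then [0] else []
  (PySem.List.pyRange 1 (max_len + 1) 1).foldl
    (fun repdigits lenn =>
      let ones : Int :=
        (PySem.List.pyRange 0 lenn 1).foldl (fun ones place => ones + 10 ^ place.toNat) (0:Int)
      (PySem.List.pyRange 1 10 1).foldl (fun acc i => acc ++ [ones * i]) repdigits)
    repdigits

-- ===== PORT B =====
-- '10 ** lenn': lenn ranges over range(1, max_len+1) so is nonnegative; 'lenn.toNat' is exact here.
def get_repdigits_alt (max_len : Int) (use_zero : Bool) : List Int :=
  let head : List Int := if use_zero then [0] else []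
  head ++ (PySem.List.pyRange 1 (max_len + 1) 1).flatMap
    (fun lenn =>
      (PySem.List.pyRange 1 10 1).map
        (fun d => PySem.Int.floordiv (d * (10 ^ lenn.toNat - 1)) 9))

-- ===== PRECONDITION & SPEC =====
def Spec_get_repdigits (max_len : Int) (use_zero : Bool) (out : List Int) : Prop := out = get_repdigits_alt max_len use_zero
instance (max_len : Int) (use_zero : Bool) (out : List Int) : Decidable (Spec_get_repdigits max_len use_zero out) := by unfold Spec_get_repdigits; infer_instance

-- ===== CLAIM (what is proved, stated in full; the proofs are below) =====
def Claim_equal_get_repdigits : Prop := ∀ (max_len : Int) (use_zero : Bool), Dom_get_repdigits max_len use_zero → Spec_get_repdigits max_len use_zero (get_repdigits max_len use_zero)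

-- ===== LEMMAS AND PROOFS =====

-- A's inner loop computes the repunit: 9 * ones(lenn) = 10^lenn - 1 (Nat version first).
theorem ones_foldl_nat (n : Nat) :
    ((PySem.List.pyRange 0 (n : Int) 1).foldl (fun ones place => ones + 10 ^ place.toNat) (0:Int)) * 9 + 1
      = 10 ^ n := by
  induction n with
  | zero => simp [PySem.List.pyRange_one_eq_nil]
  | succ n ih =>
    have h : ((n : Int) + 1) = ((n + 1 : Nat) : Int) := by push_cast; ring
    rw [← h, PySem.List.pyRange_one_succ_right (by positivity), List.foldl_append]
    simp only [List.foldl_cons, List.foldl_nil, Int.toNat_natCast]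
    set S := (PySem.List.pyRange 0 (n : Int) 1).foldl (fun ones place => ones + 10 ^ place.toNat) (0:Int)
    have : (10 : Int) ^ (n + 1) = 10 ^ n * 10 := pow_succ 10 n
    linarith [ih, this]

theorem ones_foldl (l : Int) :
    ((PySem.List.pyRange 0 l 1).foldl (fun ones place => ones + 10 ^ place.toNat) (0:Int)) * 9 + 1
      = 10 ^ l.toNat := by
  rcases (by omega : l ≤ 0 ∨ 0 < l) with h | h
  · rw [PySem.List.pyRange_one_eq_nil h]
    simp [Int.toNat_of_nonpos h]
  · have : l = (l.toNat : Int) := (Int.toNat_of_nonneg h.le).symm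
    rw [this, Int.toNat_natCast]
    exact ones_foldl_nat l.toNat

-- per-length body: A's 'ones * i' equals B's closed form, for every lenn.
theorem body_eq (lenn i : Int) :
    ((PySem.List.pyRange 0 lenn 1).foldl (fun ones place => ones + 10 ^ place.toNat) (0:Int)) * i
      = PySem.Int.floordiv (i * (10 ^ lenn.toNat - 1)) 9 := by
  set S := (PySem.List.pyRange 0 lenn 1).foldl (fun ones place => ones + 10 ^ place.toNat) (0:Int) with hS
  have h9 : (10 : Int) ^ lenn.toNat - 1 = 9 * S := by have := ones_foldl lenn; rw [← hS] at this; linarith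
  rw [h9, PySem.Int.floordiv_eq_ediv_of_pos (by norm_num)]
  rw [show i * (9 * S) = 9 * (S * i) by ring]
  exact (Int.mul_ediv_cancel_left _ (by norm_num)).symm

-- ===== VERDICT (by name: the statement is the Claim_ definition above) =====
theorem get_repdigits_spec : Claim_equal_get_repdigits := by
  intro max_len use_zero _
  unfold Spec_get_repdigits get_repdigits get_repdigits_alt
  simp only [PySem.List.foldl_append_singleton_eq_map, PySem.List.foldl_append_eq_flatMap]
  congr 1
  congr 1
  funext lenn
  exact List.map_congr_left (fun i _ => body_eq lenn i)
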